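-- pv_equiv track=rewrite | github.com/paiml/depyler | examples/hard_puzzle_happy_number.py | happy_steps
-- ===== SOURCE A (Python) =====
-- def digit_square_sum(n: int) -> int:
--     total: int = 0
--     num: int = n
--     while num > 0:
--         d: int = num % 10
--         total = total + d * d
--         num = num // 10
--     return total
--
-- def happy_steps(n: int) -> int:
--     steps: int = 0
--     current: int = n
--     limit: int = 200
--     while current != 1 and steps < limit:
--         current = digit_square_sum(current)
--         steps = steps + 1
--     if current == 1:
--         return steps
--     return 0 - 1
-- ===== SOURCE B (Python) =====
-- def digit_square_sum(n: int) -> int: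
--     if n <= 0:
--         return 0
--     d = n % 10
--     return d * d + digit_square_sum(n // 10)
--
-- def happy_steps(n: int) -> int:
--     seq = []
--     cur = n
--     for _ in range(201):
--         seq.append(cur)
--         cur = digit_square_sum(cur)
--     return seq.index(1) if 1 in seq else -1
-- ===== Notes on version B (the rewrite author's own statement) =====
-- stated objective: alternative
-- what changed: Replaces the step-counting while-loop (early exit, mutable steps/current/limit state) with materialising the list of the first 201 iterates of a recursive digit-square-sum and returning the index of the first 1 in that list (or -1).
import Mathlib
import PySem

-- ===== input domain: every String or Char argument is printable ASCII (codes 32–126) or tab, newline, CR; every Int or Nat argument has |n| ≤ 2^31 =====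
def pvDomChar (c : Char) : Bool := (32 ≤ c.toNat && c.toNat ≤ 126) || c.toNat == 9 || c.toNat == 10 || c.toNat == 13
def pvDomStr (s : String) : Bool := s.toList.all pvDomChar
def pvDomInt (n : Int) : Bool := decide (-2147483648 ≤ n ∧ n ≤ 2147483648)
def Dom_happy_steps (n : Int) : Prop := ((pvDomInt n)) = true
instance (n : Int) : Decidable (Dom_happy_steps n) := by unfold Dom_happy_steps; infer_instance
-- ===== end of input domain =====

-- B replaces A's step-counting while-loop by materialising the first 201 iterates of a
-- recursive digit-square-sum in a list and returning the index of the first 1 (or -1);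
-- objective: alternative (same cost, different structure).


-- ===== PORT A =====
-- A's digit_square_sum: while num > 0 accumulate (num % 10)^2, num //= 10
def dssLoopA (total num : Int) : Int :=
  if h : num > 0 then
    let d := PySem.Int.mod num 10
    dssLoopA (total + d * d) (PySem.Int.floordiv num 10)
  else total
termination_by num.toNat
decreasing_by
  rw [PySem.Int.floordiv_eq_ediv_of_pos (by omega : (0:Int) < 10)]; omega

def digit_square_sum (n : Int) : Int := dssLoopA 0 n

-- A's while loop: while current != 1 and steps < limit
def happyLoopA (steps current : Int) : Int :=
  if h : current ≠ 1 ∧ steps < 200 then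
    happyLoopA (steps + 1) (digit_square_sum current)
  else if current = 1 then steps else 0 - 1
termination_by (200 - steps).toNat
decreasing_by omega

def happy_steps (n : Int) : Int := happyLoopA 0 n

-- ===== PORT B =====
-- B's recursive digit_square_sum
def dssB (n : Int) : Int :=
  if h : n ≤ 0 then 0
  else
    let d := PySem.Int.mod n 10
    d * d + dssB (PySem.Int.floordiv n 10)
termination_by n.toNat
decreasing_by
  rw [PySem.Int.floordiv_eq_ediv_of_pos (by omega : (0:Int) < 10)]; omega

-- the for-loop that appends the successive iterates to seq
def iterB (cur : Int) : Nat → List Int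
  | 0 => []
  | k + 1 => cur :: iterB (dssB cur) k

def happy_steps_alt (n : Int) : Int :=
  match PySem.List.index? (iterB n 201) 1 with
  | some i => (i : Int)
  | none => -1

-- ===== PRECONDITION & SPEC =====
def Spec_happy_steps (n : Int) (out : Int) : Prop := out = happy_steps_alt n
instance (n : Int) (out : Int) : Decidable (Spec_happy_steps n out) := by unfold Spec_happy_steps; infer_instance

-- ===== CLAIM (what is proved, stated in full; the proofs are below) =====
def Claim_equal_happy_steps : Prop := ∀ (n : Int), Dom_happy_steps n → Spec_happy_steps n (happy_steps n)

-- ===== LEMMAS AND PROOFS =====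
lemma dssLoopA_eq (total num : Int) : dssLoopA total num = total + dssB num := by
  induction total, num using dssLoopA.induct with
  | case1 total num h d ih =>
    rw [dssLoopA, dssB]
    simp only [h, dif_pos, dif_neg (by omega : ¬ num ≤ 0)]
    rw [ih]; ring
  | case2 total num h =>
    rw [dssLoopA, dssB]
    simp only [dif_neg h, dif_pos (by omega : num ≤ 0)]
    ring

lemma dss_eq (n : Int) : digit_square_sum n = dssB n := by
  rw [digit_square_sum, dssLoopA_eq]; ring

lemma happyLoopA_eq_iter : ∀ (k : Nat) (cur : Int), k ≤ 200 →
    happyLoopA (200 - (k : Int)) cur =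
      (match PySem.List.index? (iterB cur (k + 1)) 1 with
       | some i => (200 - (k : Int)) + (i : Int)
       | none => -1) := by
  intro k
  induction k with
  | zero =>
    intro cur _
    rw [happyLoopA]
    by_cases h : cur = 1
    · subst h
      simp [iterB]
    · rw [dif_neg (fun hc => absurd hc.2 (by push_cast; omega))]
      simp only [if_neg h]
      have h1 : iterB cur 1 = [cur] := rfl
      rw [h1, PySem.List.index?_cons_of_ne _ h]
      simp [PySem.List.index?]
  | succ k ih =>
    intro cur hk
    rw [happyLoopA]
    by_cases h : cur = 1
    · subst h
      rw [dif_neg (by simp), if_pos rfl,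
        show iterB 1 (k + 1 + 1) = (1 : Int) :: iterB (dssB 1) (k + 1) from rfl,
        PySem.List.index?_cons_self]
      push_cast; ring
    · rw [dif_pos ⟨h, by push_cast; omega⟩]
      have hsteps : (200 - ((k + 1 : Nat) : Int)) + 1 = 200 - (k : Int) := by push_cast; ring
      rw [hsteps, dss_eq, ih (dssB cur) (by omega)]
      rw [show iterB cur (k + 1 + 1) = cur :: iterB (dssB cur) (k + 1) from rfl]
      rw [PySem.List.index?_cons_of_ne _ h]
      cases hidx : PySem.List.index? (iterB (dssB cur) (k + 1)) 1 with
      | none => simp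
      | some i => simp only [Option.map_some]; push_cast; ring

-- ===== VERDICT (by name: the statement is the Claim_ definition above) =====
theorem happy_steps_spec : Claim_equal_happy_steps := by
  intro n _
  show happy_steps n = happy_steps_alt n
  have h := happyLoopA_eq_iter 200 n (le_refl _)
  norm_num at h
  rw [happy_steps, happy_steps_alt, h]
  simp only [PySem.List.index?_eq_idxOf?]
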